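-- pv_equiv track=rewrite | github.com/MuellerDominik/BMS-Software | python/classes/isoSPI.py | calc_even_parity
-- ===== SOURCE A (Python) =====
-- def calc_even_parity(data, bytes_):
-- 	"""Calculates the even parity bit for the given data and returns it."""
-- 	n = 0
-- 	for i in range(bytes_*8):
-- 		if data & (1 << i):
-- 			n += 1
-- 	if (n % 2) == 0:
-- 		return 0
-- 	return 1
-- ===== SOURCE B (Python) =====
-- def calc_even_parity(data, bytes_):
--     """Even parity of the low bytes_*8 bits, via a logarithmic XOR fold."""
--     width = bytes_ * 8
--     if width <= 0:
--         return 0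
--     x = data & ((1 << width) - 1)
--     shift = 1
--     while shift < width:
--         x ^= x >> shift
--         shift *= 2
--     return x & 1
-- ===== Notes on version B (the rewrite author's own statement) =====
-- stated objective: faster
-- what changed: A counts set bits with a Python-level loop over all width = bytes_*8 bit positions; B masks data to the low width bits once and reduces it with a logarithmic halving XOR fold (x ^= x >> shift for shift = 1,2,4,...), returning x & 1.
import Mathlib
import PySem

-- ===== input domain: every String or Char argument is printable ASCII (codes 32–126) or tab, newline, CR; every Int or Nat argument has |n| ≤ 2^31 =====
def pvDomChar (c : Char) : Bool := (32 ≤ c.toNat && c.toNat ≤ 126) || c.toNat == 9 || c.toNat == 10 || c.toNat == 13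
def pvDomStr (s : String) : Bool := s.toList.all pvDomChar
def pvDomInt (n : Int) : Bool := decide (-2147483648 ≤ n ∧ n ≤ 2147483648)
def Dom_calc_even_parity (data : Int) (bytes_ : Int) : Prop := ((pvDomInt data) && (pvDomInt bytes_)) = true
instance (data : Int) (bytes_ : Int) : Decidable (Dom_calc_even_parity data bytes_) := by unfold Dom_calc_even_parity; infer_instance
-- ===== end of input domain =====

-- B replaces A's per-bit counting loop over all width = bytes_*8 bit positions by a
-- masked halving XOR fold (x ^= x >> shift for shift = 1,2,4,…), a different algorithm.

-- ===== PORT A =====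
def calc_even_parity (data : Int) (bytes_ : Int) : Int :=
  let n : Int := (PySem.List.pyRange 0 (bytes_ * 8)).foldl
    (fun n i => if PySem.Int.band data (1 <<< i.toNat) ≠ 0 then n + 1 else n) 0
  if PySem.Int.mod n 2 = 0 then 0 else 1

-- ===== PORT B =====
-- the while loop of Source B; sm1 + 1 is the Python variable `shift` (so shift *= 2 is sm1 ↦ 2*sm1+1)
def pvLoopB (width : Int) (x : Int) (sm1 : Nat) : Int :=
  if (sm1 : Int) + 1 < width then
    pvLoopB width (PySem.Int.bxor x (x >>> (sm1 + 1))) (2 * sm1 + 1)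
  else x
termination_by width.toNat - sm1
decreasing_by omega

def calc_even_parity_alt (data : Int) (bytes_ : Int) : Int :=
  let width := bytes_ * 8
  if width ≤ 0 then 0
  else
    PySem.Int.band (pvLoopB width (PySem.Int.band data ((1 <<< width.toNat) - 1)) 0) 1

-- ===== PRECONDITION & SPEC =====
def Spec_calc_even_parity (data : Int) (bytes_ : Int) (out : Int) : Prop := out = calc_even_parity_alt data bytes_
instance (data : Int) (bytes_ : Int) (out : Int) : Decidable (Spec_calc_even_parity data bytes_ out) := by unfold Spec_calc_even_parity; infer_instance

-- ===== CLAIM (what is proved, stated in full; the proofs are below) =====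
def Claim_equal_calc_even_parity : Prop := ∀ (data : Int) (bytes_ : Int), Dom_calc_even_parity data bytes_ → Spec_calc_even_parity data bytes_ (calc_even_parity data bytes_)

-- ===== LEMMAS AND PROOFS =====

-- parity (0/1) of the bits of x sitting at the multiples of the stride 2^t
def pvParS (x : Nat) (t : Nat) : Nat :=
  if x = 0 then 0 else (x % 2 + pvParS (x / 2 ^ 2 ^ t) t) % 2
termination_by x
decreasing_by
  exact Nat.div_lt_self (Nat.pos_of_ne_zero (by assumption)) (Nat.one_lt_two_pow (Nat.two_pow_pos t).ne')

lemma pv_div_mod_toNat (x k : Nat) : x / 2 ^ k % 2 = (x.testBit k).toNat := by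
  rw [Nat.testBit_eq_decide_div_mod_eq]
  rcases Nat.mod_two_eq_zero_or_one (x / 2 ^ k) with h | h <;> simp [h]

lemma pvParS_eq (t : Nat) : ∀ (K x : Nat), x < 2 ^ (2 ^ t * K) →
    pvParS x t = (∑ m ∈ Finset.range K, x / 2 ^ (2 ^ t * m) % 2) % 2 := by
  intro K
  induction K with
  | zero => intro x hx; simp at hx; simp [hx, pvParS]
  | succ K ih =>
    intro x hx
    by_cases h0 : x = 0
    · subst h0; simp [pvParS, Nat.zero_div]
    · rw [pvParS, if_neg h0]
      have hdiv : x / 2 ^ 2 ^ t < 2 ^ (2 ^ t * K) := by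
        rw [Nat.div_lt_iff_lt_mul (Nat.two_pow_pos _)]
        calc x < 2 ^ (2 ^ t * (K+1)) := hx
        _ = 2 ^ (2 ^ t * K) * 2 ^ 2 ^ t := by rw [← pow_add]; ring_nf
      rw [ih _ hdiv, Finset.sum_range_succ']
      have hterm : ∀ m, x / 2 ^ 2 ^ t / 2 ^ (2 ^ t * m) % 2 = x / 2 ^ (2 ^ t * (m + 1)) % 2 := by
        intro m
        rw [Nat.div_div_eq_div_mul, ← pow_add]
        congr 2
        ring
      simp only [hterm]
      have h0' : x / 2 ^ (2 ^ t * 0) % 2 = x % 2 := by norm_num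
      rw [h0']
      omega

lemma pvParS_of_lt (t x : Nat) (h : x < 2 ^ 2 ^ t) : pvParS x t = x % 2 := by
  by_cases h0 : x = 0
  · subst h0; simp [pvParS]
  · rw [pvParS, if_neg h0, Nat.div_eq_of_lt h]
    simp [pvParS]

lemma pv_sum_range_two_mul (g : Nat → Nat) : ∀ w, ∑ j ∈ Finset.range (2 * w), g j
    = ∑ m ∈ Finset.range w, (g (2 * m) + g (2 * m + 1)) := by
  intro w
  induction w with
  | zero => simp
  | succ w ih =>
    have h2 : 2 * (w + 1) = (2 * w + 1) + 1 := by ring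
    rw [h2, Finset.sum_range_succ, Finset.sum_range_succ, Finset.sum_range_succ, ih]
    ring

-- KEY: one halving XOR step doubles the stride while keeping the parity
lemma pvParS_step (t x w : Nat) (h : x < 2 ^ w) :
    pvParS (x ^^^ (x >>> 2 ^ t)) (t + 1) = pvParS x t := by
  set s : Nat := 2 ^ t with hs
  have hs1 : 1 ≤ s := Nat.one_le_two_pow
  have hwle : w ≤ s * (2 * w) := by nlinarith
  have hxb : x < 2 ^ (s * (2 * w)) := lt_of_lt_of_le h (Nat.pow_le_pow_right (by norm_num) hwle)
  have hshr : x >>> s ≤ x := by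
    rw [Nat.shiftRight_eq_div_pow]; exact Nat.div_le_self _ _
  have hyb : x ^^^ (x >>> s) < 2 ^ (s * (2 * w)) :=
    Nat.xor_lt_two_pow hxb (lt_of_le_of_lt hshr hxb)
  have e1 : 2 ^ (t + 1) * w = s * (2 * w) := by rw [hs, pow_succ]; ring
  have e0 : s * (2 * w) = 2 ^ t * (2 * w) := by rw [hs]
  rw [pvParS_eq (t + 1) w _ (by rw [e1]; exact hyb),
      pvParS_eq t (2 * w) x (by rw [← e0]; exact hxb)]
  have hterm1 : ∀ m, (x ^^^ (x >>> s)) / 2 ^ (2 ^ (t + 1) * m) % 2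
      = (((x.testBit (s * (2 * m))).toNat + (x.testBit (s * (2 * m + 1))).toNat) % 2) := by
    intro m
    rw [pv_div_mod_toNat, Nat.testBit_xor, Nat.testBit_shiftRight]
    have e2 : 2 ^ (t + 1) * m = s * (2 * m) := by rw [hs, pow_succ]; ring
    have e3 : s + s * (2 * m) = s * (2 * m + 1) := by ring
    rw [e2, e3]
    rcases Bool.eq_false_or_eq_true (x.testBit (s * (2 * m))) with h1 | h1 <;>
      rcases Bool.eq_false_or_eq_true (x.testBit (s * (2 * m + 1))) with h2 | h2 <;>
      simp [h1, h2]
  have hterm2 : ∀ j, x / 2 ^ (2 ^ t * j) % 2 = (x.testBit (s * j)).toNat := by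
    intro j; rw [pv_div_mod_toNat, hs]
  calc (∑ m ∈ Finset.range w, (x ^^^ (x >>> s)) / 2 ^ (2 ^ (t + 1) * m) % 2) % 2
      = (∑ m ∈ Finset.range w, ((x.testBit (s * (2 * m))).toNat + (x.testBit (s * (2 * m + 1))).toNat) % 2) % 2 := by
        rw [Finset.sum_congr rfl (fun m _ => hterm1 m)]
    _ = (∑ m ∈ Finset.range w, ((x.testBit (s * (2 * m))).toNat + (x.testBit (s * (2 * m + 1))).toNat)) % 2 := by
        conv_rhs => rw [Finset.sum_nat_mod]
    _ = (∑ j ∈ Finset.range (2 * w), (x.testBit (s * j)).toNat) % 2 := by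
        rw [pv_sum_range_two_mul (fun j => (x.testBit (s * j)).toNat) w]
    _ = (∑ j ∈ Finset.range (2 * w), x / 2 ^ (2 ^ t * j) % 2) % 2 := by
        rw [Finset.sum_congr rfl (fun j _ => (hterm2 j).symm)]

-- the loop of B computes the stride-2^t bit parity of its (nonnegative) input
lemma pvLoopB_spec (w : Nat) : ∀ (d sm1 t : Nat), w - sm1 ≤ d → sm1 + 1 = 2 ^ t →
    ∀ n : Nat, n < 2 ^ w →
    ∃ m : Nat, pvLoopB (w : Int) (n : Int) sm1 = (m : Int) ∧ m % 2 = pvParS n t := by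
  intro d
  induction d with
  | zero =>
    intro sm1 t hd ht n hn
    rw [pvLoopB, if_neg (by omega)]
    refine ⟨n, rfl, ?_⟩
    rw [pvParS_of_lt]
    exact lt_of_lt_of_le hn (Nat.pow_le_pow_right (by norm_num) (by omega))
  | succ d ih =>
    intro sm1 t hd ht n hn
    by_cases hg : (sm1 : Int) + 1 < (w : Int)
    · rw [pvLoopB, if_pos hg]
      have hnn : ((n : Int)) >>> (sm1 + 1) = ((n >>> (sm1 + 1) : Nat) : Int) :=
        (Int.natCast_shiftRight _ _).symm
      rw [hnn, PySem.Int.bxor_of_nonneg (by positivity) (by positivity)]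
      simp only [Int.toNat_natCast]
      have hy : n ^^^ (n >>> (sm1 + 1)) < 2 ^ w := by
        apply Nat.xor_lt_two_pow hn
        exact lt_of_le_of_lt (by rw [Nat.shiftRight_eq_div_pow]; exact Nat.div_le_self _ _) hn
      have ht' : (2 * sm1 + 1) + 1 = 2 ^ (t + 1) := by rw [pow_succ]; omega
      obtain ⟨m, hm, hpar⟩ := ih (2 * sm1 + 1) (t + 1) (by omega) ht' _ hy
      refine ⟨m, hm, ?_⟩
      rw [hpar, ht]
      exact pvParS_step t n w hn
    · rw [pvLoopB, if_neg hg]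
      refine ⟨n, rfl, ?_⟩
      rw [pvParS_of_lt]
      exact lt_of_lt_of_le hn (Nat.pow_le_pow_right (by norm_num) (by omega))

-- Python a & ((1 << w) - 1) is a mod 2^w, also for negative a
lemma pv_band_mask (a : Int) (w : Nat) : PySem.Int.band a ((1 <<< w) - 1) = a % ((2 : Int) ^ w) := by
  have hs : ((1 <<< w : Nat) : Int) - 1 = ((2 ^ w - 1 : Nat) : Int) := by
    have := Nat.one_le_two_pow (n := w)
    push_cast [Nat.shiftLeft_eq, this]
    ring
  rw [hs]
  rcases le_or_gt 0 a with ha | ha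
  · rw [PySem.Int.band_of_nonneg ha (by positivity), Int.toNat_natCast,
      Nat.and_two_pow_sub_one_eq_mod]
    conv_rhs => rw [← Int.toNat_of_nonneg ha]
    push_cast
    rfl
  · rw [PySem.Int.band, if_neg (by omega), if_pos (by positivity)]
    simp only [Int.toNat_natCast]
    set m : Nat := (-a - 1).toNat with hm
    have ham : a = -(m : Int) - 1 := by simp [hm]; omega
    rw [Nat.land_comm, Nat.and_two_pow_sub_one_eq_mod]
    have hsplit : a = (2 ^ w : Int) * (-((m / 2 ^ w : Nat) : Int) - 1)
        + ((2 ^ w - 1 - (m % 2 ^ w : Nat) : Int)) := by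
      have := Nat.div_add_mod m (2 ^ w)
      have hc : ((m : Int)) = ((2 ^ w : Nat) : Int) * ((m / 2 ^ w : Nat) : Int) + ((m % 2 ^ w : Nat) : Int) := by
        exact_mod_cast congrArg (fun n : Nat => (n : Int)) this.symm
      rw [ham]
      push_cast at hc ⊢
      linarith
    have hmlt : ((m % 2 ^ w : Nat) : Int) < 2 ^ w := by
      exact_mod_cast Nat.mod_lt m (Nat.two_pow_pos w)
    have hmnn : (0 : Int) ≤ ((m % 2 ^ w : Nat) : Int) := by positivity
    rw [hsplit, Int.mul_comm, Int.add_comm, Int.add_mul_emod_self_right]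
    rw [Int.emod_eq_of_lt (by omega) (by omega)]
    have h1 : (1 : Nat) ≤ 2 ^ w := Nat.one_le_two_pow
    have h2 : m % 2 ^ w ≤ 2 ^ w - 1 := by omega
    push_cast [h1, h2]
    ring

-- Python a & (1 << i) is 2^i times bit i of a (two's complement)
lemma pv_band_two_pow (a : Int) (i : Nat) : PySem.Int.band a (1 <<< i) = 2 ^ i * ((a >>> i) % 2) := by
  have hsh : ((1 <<< i : Nat) : Int) = ((2 ^ i : Nat) : Int) := by
    norm_num [Nat.shiftLeft_eq]
  rcases le_or_gt 0 a with ha | ha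
  · rw [hsh, PySem.Int.band_of_nonneg ha (by positivity)]
    simp only [Int.toNat_natCast]
    conv_lhs => rw [← Int.toNat_of_nonneg ha]
    rw [Int.toNat_natCast, Nat.and_two_pow]
    conv_rhs => rw [← Int.toNat_of_nonneg ha]
    rw [← Int.natCast_shiftRight, Nat.shiftRight_eq_div_pow, ← pv_div_mod_toNat]
    push_cast
    ring
  · rw [PySem.Int.band, if_neg (by omega), if_pos (by positivity)]
    set m : Nat := (-a - 1).toNat with hm
    have ham : a = -(m : Int) - 1 := by simp [hm]; omega
    have htn : ((1 <<< i : Nat) : Int).toNat = 2 ^ i := by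
      rw [hsh, Int.toNat_natCast]
    rw [htn, Nat.two_pow_and]
    have hdiv : a >>> i = -((m / 2 ^ i : Nat) : Int) - 1 := by
      rw [Int.shiftRight_eq_div_pow, ham]
      have hsplit : -(m : Int) - 1
          = (2 ^ i - 1 - ((m % 2 ^ i : Nat) : Int)) + (-((m / 2 ^ i : Nat) : Int) - 1) * (2 ^ i : Nat) := by
        have := Nat.div_add_mod m (2 ^ i)
        have hc : ((m : Int)) = ((2 ^ i : Nat) : Int) * ((m / 2 ^ i : Nat) : Int) + ((m % 2 ^ i : Nat) : Int) := by
          exact_mod_cast congrArg (fun n : Nat => (n : Int)) this.symm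
        push_cast at hc ⊢
        linarith
      rw [hsplit, Int.add_mul_ediv_right _ _ (by positivity)]
      have hmod : ((m % 2 ^ i : Nat) : Int) < 2 ^ i := by
        exact_mod_cast Nat.mod_lt m (Nat.two_pow_pos i)
      have hz : ((2 : Int) ^ i - 1 - ((m % 2 ^ i : Nat) : Int)) / ((2 ^ i : Nat) : Int) = 0 := by
        apply Int.ediv_eq_zero_of_lt
        · have : ((m % 2 ^ i : Nat) : Int) ≥ 0 := by positivity
          push_cast
          omega
        · push_cast
          omega
      rw [hz]
      ring
    rw [hdiv]
    have hq : (-((m / 2 ^ i : Nat) : Int) - 1) % 2 = 1 - (((m / 2 ^ i) % 2 : Nat) : Int) := by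
      omega
    rw [hq, pv_div_mod_toNat]
    rcases Bool.eq_false_or_eq_true (m.testBit i) with hb | hb <;> simp [hb]

-- A's loop accumulates the number of set bits among the low w bits
lemma pv_foldA (data : Int) : ∀ (w : Nat) (c : Int),
    (List.map (fun (k : Nat) => (k : Int)) (List.range w)).foldl
      (fun n i => if PySem.Int.band data (1 <<< i.toNat) ≠ 0 then n + 1 else n) c
      = c + ((∑ i ∈ Finset.range w, ((data >>> i) % 2).toNat : Nat) : Int) := by
  intro w
  induction w with
  | zero => simp
  | succ w ih =>
    intro c
    rw [List.range_succ, List.map_append, List.foldl_append, ih, Finset.sum_range_succ]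
    simp only [List.map_cons, List.map_nil, List.foldl_cons, List.foldl_nil]
    by_cases h : PySem.Int.band data (1 <<< ((w : Int)).toNat) ≠ 0
    · rw [if_pos h]
      rw [Int.toNat_natCast, pv_band_two_pow] at h
      rcases Int.emod_two_eq_zero_or_one (data >>> w) with h2 | h2
      · exact absurd (by rw [h2, mul_zero]) h
      · rw [h2]
        push_cast
        ring
    · rw [if_neg h]
      rw [Int.toNat_natCast, pv_band_two_pow, not_not] at h
      rcases Int.emod_two_eq_zero_or_one (data >>> w) with h2 | h2
      · rw [h2]
        simp
      · rw [h2, mul_one] at h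
        exact absurd h (by positivity)

-- low-bit agreement of data and data mod 2^w
lemma pv_low_bits (data : Int) (w i : Nat) (hiw : i < w) :
    ((data % (2 : Int) ^ w).toNat) / 2 ^ i % 2 = ((data >>> i) % 2).toNat := by
  have hpos : (0 : Int) < 2 ^ w := by positivity
  have hR : 0 ≤ data % (2 : Int) ^ w := Int.emod_nonneg data (by positivity)
  set R := data % (2 : Int) ^ w with hRdef
  set Q := data / (2 : Int) ^ w with hQdef
  have hsplit : data = R + (Q * 2 ^ (w - i)) * 2 ^ i := by
    have h1 : data = 2 ^ w * Q + R := (Int.ediv_add_emod data (2 ^ w)).symm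
    have h2 : (2 : Int) ^ w = 2 ^ (w - i) * 2 ^ i := by
      rw [← pow_add]
      congr 1
      omega
    rw [h1, h2]
    ring
  have hdiv : data >>> i = R / 2 ^ i + Q * 2 ^ (w - i) := by
    rw [Int.shiftRight_eq_div_pow]
    conv_lhs => rw [hsplit]
    push_cast
    rw [Int.add_mul_ediv_right _ _ (by positivity)]
  have heven : (Q * 2 ^ (w - i)) % 2 = 0 := by
    have h3 : (2 : Int) ^ (w - i) = 2 ^ (w - i - 1) * 2 := by
      rw [← pow_succ]
      congr 1
      omega
    rw [h3, ← mul_assoc, Int.mul_emod_left]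
  have hsame : (data >>> i) % 2 = (R / 2 ^ i) % 2 := by
    rw [hdiv, Int.add_emod, heven, add_zero, Int.emod_emod_of_dvd _ dvd_rfl]
  rw [hsame]
  have hcast : R / (2 : Int) ^ i = ((R.toNat / 2 ^ i : Nat) : Int) := by
    conv_lhs => rw [← Int.toNat_of_nonneg hR]
    push_cast
    rfl
  rw [hcast]
  omega

lemma pv_mod_two_natCast (x : Nat) : PySem.Int.mod (x : Int) 2 = ((x % 2 : Nat) : Int) := by
  simp [PySem.Int.mod, Int.fmod_eq_emod]

-- ===== VERDICT (by name: the statement is the Claim_ definition above) =====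
theorem calc_even_parity_spec : Claim_equal_calc_even_parity := by
  intro data bytes_ _
  unfold Spec_calc_even_parity
  by_cases hb : bytes_ * 8 ≤ 0
  · have hA : calc_even_parity data bytes_ = 0 := by
      unfold calc_even_parity
      dsimp only
      have hr : PySem.List.pyRange 0 (bytes_ * 8) = [] := by
        simp [PySem.List.pyRange]
        omega
      rw [hr]
      simp [PySem.Int.mod, Int.fmod_eq_emod]
    have hB : calc_even_parity_alt data bytes_ = 0 := by
      unfold calc_even_parity_alt
      dsimp only
      rw [if_pos hb]
    rw [hA, hB]
  · set w : Nat := (bytes_ * 8).toNat with hw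
    have hwcast : bytes_ * 8 = (w : Int) := by omega
    set S : Nat := ∑ i ∈ Finset.range w, ((data >>> i) % 2).toNat with hS
    have hRnn : 0 ≤ data % (2 : Int) ^ w := Int.emod_nonneg data (by positivity)
    set n0 : Nat := (data % (2 : Int) ^ w).toNat with hn0
    have hRcast : data % (2 : Int) ^ w = (n0 : Int) := by omega
    have hn0lt : n0 < 2 ^ w := by
      have := Int.emod_lt_of_pos data (b := (2 : Int) ^ w) (by positivity)
      have h2 : ((2 ^ w : Nat) : Int) = (2 : Int) ^ w := by push_cast; rfl
      omega
    have hA : calc_even_parity data bytes_ = ((S % 2 : Nat) : Int) := by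
      unfold calc_even_parity
      dsimp only
      rw [hwcast, PySem.List.pyRange_zero_natCast]
      rw [pv_foldA data w 0, zero_add, ← hS, pv_mod_two_natCast]
      rcases Nat.mod_two_eq_zero_or_one S with h | h <;> rw [h] <;> simp
    have hB : calc_even_parity_alt data bytes_ = ((pvParS n0 0 : Nat) : Int) := by
      unfold calc_even_parity_alt
      dsimp only
      rw [if_neg (by omega), hwcast]
      simp only [Int.toNat_natCast]
      rw [pv_band_mask, hRcast]
      obtain ⟨m, hm, hpar⟩ := pvLoopB_spec w w 0 0 (by omega) (by norm_num) n0 hn0lt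
      rw [hm, PySem.Int.band_one, pv_mod_two_natCast, hpar]
    have hsum : pvParS n0 0 = S % 2 := by
      rw [pvParS_eq 0 w n0 (by simpa using hn0lt), hS]
      congr 1
      refine Finset.sum_congr rfl (fun i hi => ?_)
      rw [pow_zero, one_mul]
      exact pv_low_bits data w i (Finset.mem_range.mp hi)
    rw [hA, hB, hsum]
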